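-- pv_equiv track=rewrite | github.com/proger-exe/golubin-refact | src/apis/ClientsData/GoogleSheets/daily_clients_gsh_uploading.py | get_last_column
-- ===== SOURCE A (Python) =====
-- def get_last_column(letter: str) -> str:
--     if len(letter) == 1:
--         if letter == 'A':
--             return ''
--         return chr(ord(letter) - 1)
--     if letter[-1] == 'A':
--         return get_last_column(letter[: -1]) + 'Z'
--     letter = letter[:-1] + chr(ord(letter[-1]) - 1)
--     return letter
-- ===== SOURCE B (Python) =====
-- def get_last_column(letter: str) -> str:
--     chars = list(letter)
--     i = len(chars) - 1
--     while i >= 0 and chars[i] == 'A':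
--         chars[i] = 'Z'
--         i -= 1
--     if i < 0:
--         return ''.join(chars[1:])
--     chars[i] = chr(ord(chars[i]) - 1)
--     return ''.join(chars)
-- ===== Notes on version B (the rewrite author's own statement) =====
-- stated objective: alternative
-- what changed: Replaces A's string-slicing recursion with a single iterative borrow loop over a char list (scan A's from the right to Z, decrement the first non-A, drop the leading char when all were A).
import Mathlib
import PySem

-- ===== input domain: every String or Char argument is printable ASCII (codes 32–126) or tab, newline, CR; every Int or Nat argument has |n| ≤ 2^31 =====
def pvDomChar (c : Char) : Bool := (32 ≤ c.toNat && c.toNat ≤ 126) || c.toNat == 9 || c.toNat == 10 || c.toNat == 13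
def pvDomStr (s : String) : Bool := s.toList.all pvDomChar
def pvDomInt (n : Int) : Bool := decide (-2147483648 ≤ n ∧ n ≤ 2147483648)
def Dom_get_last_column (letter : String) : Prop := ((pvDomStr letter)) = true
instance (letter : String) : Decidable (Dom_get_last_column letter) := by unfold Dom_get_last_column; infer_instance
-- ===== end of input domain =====

-- B changes A's slicing recursion into one right-to-left borrow loop over a char list; equal return values proved for nonempty input (A raises IndexError on "").

-- ===== PORT A =====
-- A, transliterated over List Char: letter[:-1] = dropLast, letter[-1] = getLastD
-- (nonemptiness from the pattern), chr(ord c - 1) = Char.ofNat (c.toNat - 1).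
-- goA [] = [] is dead code under Pre_ (Python A raises IndexError on "").
def goA : List Char → List Char
  | [] => []
  | [c] => if c = 'A' then [] else [Char.ofNat (c.toNat - 1)]
  | c1 :: c2 :: rest =>
      let l := c1 :: c2 :: rest
      if l.getLastD 'A' = 'A' then goA l.dropLast ++ ['Z']
      else l.dropLast ++ [Char.ofNat ((l.getLastD 'A').toNat - 1)]
  termination_by l => l.length
  decreasing_by simp [List.dropLast]

def get_last_column (letter : String) : String := String.mk (goA letter.toList)

-- ===== PORT B =====
-- B's while loop, transliterated as recursion over the REVERSED char list
-- (the loop walks i from the end leftwards): result is (chars after the loop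
-- and the decrement, still reversed; whether a decrement happened, i.e. i ≥ 0).
def goB : List Char → List Char × Bool
  | [] => ([], false)
  | c :: rest =>
      if c = 'A' then
        let p := goB rest
        ('Z' :: p.1, p.2)
      else (Char.ofNat (c.toNat - 1) :: rest, true)

def get_last_column_alt (letter : String) : String :=
  let p := goB letter.toList.reverse
  if p.2 then String.mk p.1.reverse else String.mk (p.1.reverse.drop 1)

-- ===== PRECONDITION & SPEC =====
-- Pre_ excludes only the empty string, where Python A raises IndexError on letter[-1].
def Pre_get_last_column (letter : String) : Prop := letter ≠ ""
instance (letter : String) : Decidable (Pre_get_last_column letter) := by unfold Pre_get_last_column; infer_instance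
def pvWitness_get_last_column : String := "AB"

def Spec_get_last_column (letter : String) (out : String) : Prop := out = get_last_column_alt letter
instance (letter : String) (out : String) : Decidable (Spec_get_last_column letter out) := by unfold Spec_get_last_column; infer_instance

-- ===== CLAIM (what is proved, stated in full; the proofs are below) =====
def Claim_equal_get_last_column : Prop := ∀ (letter : String), Dom_get_last_column letter → Pre_get_last_column letter → Spec_get_last_column letter (get_last_column letter)

-- ===== LEMMAS AND PROOFS =====

-- B's result, at the List Char level.
def bres (l : List Char) : List Char :=
  if (goB l.reverse).2 then (goB l.reverse).1.reverse else (goB l.reverse).1.reverse.drop 1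

lemma goB_length (l : List Char) : (goB l).1.length = l.length := by
  induction l with
  | nil => simp [goB]
  | cons c rest ih => by_cases h : c = 'A' <;> simp [goB, h, ih]

lemma goA_concat (l' : List Char) (a : Char) (h : l' ≠ []) :
    goA (l' ++ [a]) =
      if a = 'A' then goA l' ++ ['Z'] else l' ++ [Char.ofNat (a.toNat - 1)] := by
  match l', h with
  | x :: xs, _ =>
    cases xs with
    | nil =>
      rw [goA.eq_def]
      simp [List.getLastD]
    | cons y ys =>
      have hsplit : (x :: y :: ys) ++ [a] = x :: y :: (ys ++ [a]) := by simp
      rw [hsplit, goA.eq_def]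
      have h1 : x :: y :: (ys ++ [a]) = (x :: y :: ys) ++ [a] := by simp
      simp only [h1, List.getLastD_concat, List.dropLast_concat]

lemma main_lemma (l : List Char) (h : l ≠ []) : goA l = bres l := by
  induction l using List.reverseRecOn with
  | nil => exact absurd rfl h
  | append_singleton l' a ih =>
    by_cases hl : l' = []
    · subst hl
      rw [show ([] : List Char) ++ [a] = [a] by simp, goA.eq_def]
      by_cases ha : a = 'A' <;> simp [bres, goB, ha]
    · rw [goA_concat l' a hl]
      by_cases ha : a = 'A'
      · -- borrow case: last char is 'A'
        have hrev : (l' ++ [a]).reverse = a :: l'.reverse := by simp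
        by_cases hb : (goB l'.reverse).2
        · simp [bres, goB, ha, hb, ih hl]
        · have hlen : (goB l'.reverse).1.reverse ≠ [] := by
            have := goB_length l'.reverse
            intro hcon
            have : l'.length = 0 := by
              simpa [this] using congrArg List.length hcon
            exact hl (List.eq_nil_of_length_eq_zero this)
          have hdrop :
              (('Z' :: (goB l'.reverse).1).reverse).drop 1 =
                (goB l'.reverse).1.reverse.drop 1 ++ ['Z'] := by
            rw [List.reverse_cons, List.drop_append_of_le_length]
            exact Nat.one_le_iff_ne_zero.mpr (by simpa using hlen)
          have key : goA l' = (goB l'.reverse).1.reverse.drop 1 := by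
            rw [ih hl]; simp [bres, hb]
          have hres : bres (l' ++ [a]) =
              (goB l'.reverse).1.reverse.drop 1 ++ ['Z'] := by
            rw [bres, hrev,
              show goB (a :: l'.reverse) =
                ('Z' :: (goB l'.reverse).1, (goB l'.reverse).2) from by simp [goB, ha],
              if_neg hb]
            exact hdrop
          rw [hres, key, if_pos ha]
      · have hrev : (l' ++ [a]).reverse = a :: l'.reverse := by simp
        simp [bres, hrev, goB, ha]

lemma toList_ne_nil (s : String) (h : s ≠ "") : s.toList ≠ [] := by
  intro hc
  exact h (by simpa using hc)

-- ===== VERDICT (by name: the statement is the Claim_ definition above) =====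
theorem get_last_column_spec : Claim_equal_get_last_column := by
  intro letter _ hpre
  unfold Spec_get_last_column get_last_column get_last_column_alt
  rw [main_lemma letter.toList (toList_ne_nil letter hpre)]
  unfold bres
  by_cases hb : (goB letter.toList.reverse).2 <;> simp [hb]
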